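-- pv_equiv track=rewrite | github.com/cyberfabric/spaider | skills/fdd-artifact-validate/scripts/validate_artifact.py | _paragraph_count
-- ===== SOURCE A (Python) =====
-- from typing import Dict, List, Optional, Tuple
--
-- def _paragraph_count(lines: List[str]) -> int:
--     paras = 0
--     buf: List[str] = []
--     for l in lines:
--         s = l.strip()
--         if not s:
--             if any(x.strip() for x in buf):
--                 paras += 1
--             buf = []
--             continue
--         if s.startswith("#"):
--             continue
--         buf.append(s)
--     if any(x.strip() for x in buf):
--         paras += 1
--     return paras
-- ===== SOURCE B (Python) =====
-- from typing import List
--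
-- def _paragraph_count(lines: List[str]) -> int:
--     # Partition-then-test: walk the list with an index, carve out each maximal
--     # run of non-blank lines, and count the runs containing a non-comment line.
--     count = 0
--     i, n = 0, len(lines)
--     while i < n:
--         if not lines[i].strip():
--             i += 1
--             continue
--         run = []
--         while i < n and lines[i].strip():
--             run.append(lines[i])
--             i += 1
--         if any(not x.strip().startswith("#") for x in run):
--             count += 1
--     return count
-- ===== Notes on version B (the rewrite author's own statement) =====
-- stated objective: alternative
-- what changed: Replaces A's running-buffer accumulator (appending stripped lines and flushing on blanks) with a partition-then-test structure: carve the input into maximal runs of non-blank lines and count the runs containing at least one non-comment line.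
import Mathlib
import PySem

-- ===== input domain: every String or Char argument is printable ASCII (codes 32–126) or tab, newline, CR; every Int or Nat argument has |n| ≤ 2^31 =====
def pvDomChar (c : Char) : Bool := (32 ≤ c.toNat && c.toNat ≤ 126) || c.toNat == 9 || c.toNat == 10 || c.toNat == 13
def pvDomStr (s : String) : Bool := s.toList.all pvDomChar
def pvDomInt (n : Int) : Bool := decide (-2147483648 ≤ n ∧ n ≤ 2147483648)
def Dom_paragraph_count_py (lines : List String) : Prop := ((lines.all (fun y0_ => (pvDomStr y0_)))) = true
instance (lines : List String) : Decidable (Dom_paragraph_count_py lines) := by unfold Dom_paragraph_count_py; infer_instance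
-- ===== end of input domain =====

-- B replaces A's running-buffer accumulator by a partition-then-test structure
-- (maximal non-blank runs, counting those with a non-comment line); same cost.

-- ===== PORT A =====
def paragraph_count_py (lines : List String) : Int :=
  let st := lines.foldl (fun (st : Int × List String) l =>
    if PySem.Str.strip l = "" then
      ((if st.2.any (fun x => PySem.Str.strip x != "") then st.1 + 1 else st.1), [])
    else if PySem.Str.startswith (PySem.Str.strip l) "#" then st
    else (st.1, st.2 ++ [PySem.Str.strip l])) (0, [])
  if st.2.any (fun x => PySem.Str.strip x != "") then st.1 + 1 else st.1

-- ===== PORT B =====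
def pcBlank (l : String) : Bool := PySem.Str.strip l == ""

def pcKeep (r : List String) : Bool :=
  r.any (fun x => !(PySem.Str.startswith (PySem.Str.strip x) "#"))

-- the outer while loop of Source B: carve out maximal runs of non-blank lines
def pcBlocks : List String → List (List String)
  | [] => []
  | l :: ls =>
    if pcBlank l then pcBlocks ls
    else (l :: ls.takeWhile (fun x => !pcBlank x)) ::
         pcBlocks (ls.dropWhile (fun x => !pcBlank x))
termination_by ls => ls.length
decreasing_by
  · simp
  · have h := (List.dropWhile_sublist (l := ls) (p := fun x => !pcBlank x)).length_le
    simp only [List.length_cons]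
    omega

def paragraph_count_py_alt (lines : List String) : Int :=
  ((pcBlocks lines).countP pcKeep : Nat)

-- ===== PRECONDITION & SPEC =====
def Spec_paragraph_count_py (lines : List String) (out : Int) : Prop := out = paragraph_count_py_alt lines
instance (lines : List String) (out : Int) : Decidable (Spec_paragraph_count_py lines out) := by unfold Spec_paragraph_count_py; infer_instance

-- ===== CLAIM (what is proved, stated in full; the proofs are below) =====
def Claim_equal_paragraph_count_py : Prop := ∀ (lines : List String), Dom_paragraph_count_py lines → Spec_paragraph_count_py lines (paragraph_count_py lines)

-- ===== LEMMAS AND PROOFS =====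

-- proof-side names for A's loop body and final flush (definitionally A's lambda)
def pcStepFn (st : Int × List String) (l : String) : Int × List String :=
  if PySem.Str.strip l = "" then
    ((if st.2.any (fun x => PySem.Str.strip x != "") then st.1 + 1 else st.1), [])
  else if PySem.Str.startswith (PySem.Str.strip l) "#" then st
  else (st.1, st.2 ++ [PySem.Str.strip l])

def pcFinish (st : Int × List String) : Int :=
  if st.2.any (fun x => PySem.Str.strip x != "") then st.1 + 1 else st.1

lemma dropWhile_head_false {α : Type} (p : α → Bool) :
    ∀ (l : List α) (a : α) (t : List α), l.dropWhile p = a :: t → p a = false := by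
  intro l
  induction l with
  | nil => simp
  | cons x xs ih =>
    intro a t h
    by_cases hp : p x
    · rw [List.dropWhile_cons_of_pos hp] at h
      exact ih _ _ h
    · rw [List.dropWhile_cons_of_neg hp] at h
      cases h
      simpa using hp

lemma dropWhile_self {α : Type} (p : α → Bool) (l : List α) :
    (l.dropWhile p).dropWhile p = l.dropWhile p := by
  cases h : l.dropWhile p with
  | nil => rfl
  | cons a t =>
    have ha : p a = false := dropWhile_head_false p l a t h
    simp [ha]

lemma chars_strip_idem (cs : List Char) :
    PySem.Chars.strip (PySem.Chars.strip cs) = PySem.Chars.strip cs := by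
  unfold PySem.Chars.strip PySem.Chars.rstrip PySem.Chars.lstrip
  set sp := PySem.Chars.isspace with hsp
  set u := cs.dropWhile sp with hu
  set v := (u.reverse.dropWhile sp).reverse with hv
  have hvu : v <+: u := by
    have h1 : v.reverse <:+ u.reverse := by
      rw [hv, List.reverse_reverse]
      exact List.dropWhile_suffix sp
    exact (List.reverse_suffix).mp h1
  have hdv : v.dropWhile sp = v := by
    cases h : v with
    | nil => rfl
    | cons c v' =>
      obtain ⟨w, hw⟩ := hvu
      rw [h] at hw
      have hc : sp c = false := by
        refine dropWhile_head_false sp cs c (v' ++ w) ?_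
        rw [← hu, ← hw]
        simp
      simp [hc]
  rw [hdv, hv, List.reverse_reverse, dropWhile_self]

lemma str_strip_idem (s : String) :
    PySem.Str.strip (PySem.Str.strip s) = PySem.Str.strip s := by
  have h := chars_strip_idem s.toList
  unfold PySem.Str.strip at *
  simp [h]

-- the abstract recursion both ports compute: b = "the current run has a non-comment line"
def pcGo : List String → Bool → Int
  | [], b => if b then 1 else 0
  | l :: ls, b =>
    if pcBlank l then (if b then 1 else 0) + pcGo ls false
    else if PySem.Str.startswith (PySem.Str.strip l) "#" then pcGo ls b
    else pcGo ls true

lemma pcGo_run (run rest : List String) (b : Bool)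
    (h : ∀ x ∈ run, pcBlank x = false) :
    pcGo (run ++ rest) b = pcGo rest (b || run.any (fun x => !(PySem.Str.startswith (PySem.Str.strip x) "#"))) := by
  induction run generalizing b with
  | nil => simp
  | cons x run ih =>
    have hx : pcBlank x = false := h x (by simp)
    have hr : ∀ y ∈ run, pcBlank y = false := fun y hy => h y (by simp [hy])
    rw [List.cons_append]
    simp only [pcGo]
    rw [if_neg (by simp [hx]), List.any_cons]
    by_cases hc : PySem.Str.startswith (PySem.Str.strip x) "#" = true
    · rw [if_pos hc, ih _ hr]
      have hnc : (!(PySem.Str.startswith (PySem.Str.strip x) "#")) = false := by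
        rw [hc]; rfl
      rw [hnc, Bool.false_or]
    · rw [Bool.not_eq_true] at hc
      rw [if_neg (by rw [hc]; simp), ih _ hr]
      have hnc : (!(PySem.Str.startswith (PySem.Str.strip x) "#")) = true := by
        rw [hc]; rfl
      rw [hnc, Bool.true_or, Bool.or_true]

lemma lemA (lines : List String) (p : Int) (buf : List String) :
    pcFinish (lines.foldl pcStepFn (p, buf))
    = p + pcGo lines (buf.any (fun x => PySem.Str.strip x != "")) := by
  induction lines generalizing p buf with
  | nil =>
    simp only [List.foldl_nil, pcFinish, pcGo]
    split <;> omega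
  | cons l ls ih =>
    rw [List.foldl_cons]
    by_cases hb : PySem.Str.strip l = ""
    · have hbk : pcBlank l = true := by simp [pcBlank, hb]
      rw [show pcStepFn (p, buf) l
          = ((if buf.any (fun x => PySem.Str.strip x != "") then p + 1 else p), []) by
        simp only [pcStepFn]; rw [if_pos hb]]
      rw [ih]
      simp only [pcGo, List.any_nil]
      rw [if_pos hbk]
      split <;> omega
    · have hbk : ¬ pcBlank l = true := by simp [pcBlank, hb]
      by_cases hc : PySem.Str.startswith (PySem.Str.strip l) "#" = true
      · rw [show pcStepFn (p, buf) l = (p, buf) by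
          simp only [pcStepFn]; rw [if_neg hb, if_pos hc]]
        rw [ih]
        simp only [pcGo]
        rw [if_neg hbk, if_pos hc]
      · rw [show pcStepFn (p, buf) l = (p, buf ++ [PySem.Str.strip l]) by
          simp only [pcStepFn]; rw [if_neg hb, if_neg hc]]
        rw [ih]
        have hstep : (buf ++ [PySem.Str.strip l]).any (fun x => PySem.Str.strip x != "") = true := by
          rw [List.any_append]
          simp only [List.any_cons, List.any_nil, str_strip_idem]
          simp [hb]
        rw [hstep]
        simp only [pcGo]
        rw [if_neg hbk, if_neg hc]

lemma lemB (lines : List String) :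
    ((pcBlocks lines).countP pcKeep : Int) = pcGo lines false := by
  induction lines using pcBlocks.induct with
  | case1 => simp [pcBlocks, pcGo]
  | case2 l ls hbl ih =>
    rw [pcBlocks, if_pos hbl, ih]
    simp [pcGo, hbl]
  | case3 l ls hbl ih =>
    have hrun : ∀ x ∈ l :: ls.takeWhile (fun x => !pcBlank x), pcBlank x = false := by
      intro x hx
      rcases List.mem_cons.mp hx with rfl | hx
      · simpa using hbl
      · have := List.mem_takeWhile_imp hx
        simpa using this
    have hsplit : l :: ls = (l :: ls.takeWhile (fun x => !pcBlank x)) ++ ls.dropWhile (fun x => !pcBlank x) := by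
      simp [List.takeWhile_append_dropWhile]
    have hgo : pcGo (l :: ls) false
        = pcGo (ls.dropWhile (fun x => !pcBlank x)) (pcKeep (l :: ls.takeWhile (fun x => !pcBlank x))) := by
      rw [hsplit]
      rw [pcGo_run _ _ _ hrun]
      simp [pcKeep]
    have hrest : pcGo (ls.dropWhile (fun x => !pcBlank x)) (pcKeep (l :: ls.takeWhile (fun x => !pcBlank x)))
        = (if pcKeep (l :: ls.takeWhile (fun x => !pcBlank x)) then 1 else 0)
          + pcGo (ls.dropWhile (fun x => !pcBlank x)) false := by
      cases h : ls.dropWhile (fun x => !pcBlank x) with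
      | nil => simp [pcGo]
      | cons r rs =>
        have hr : pcBlank r = true := by
          have := dropWhile_head_false (fun x => !pcBlank x) ls r rs h
          simpa using this
        simp [pcGo, hr]
    rw [hgo, hrest, ← ih, pcBlocks, if_neg hbl, List.countP_cons]
    split <;> push_cast <;> omega

-- ===== VERDICT (by name: the statement is the Claim_ definition above) =====
theorem paragraph_count_py_spec : Claim_equal_paragraph_count_py := by
  intro lines _
  unfold Spec_paragraph_count_py
  show pcFinish (lines.foldl pcStepFn (0, [])) = paragraph_count_py_alt lines
  rw [lemA lines 0 []]
  unfold paragraph_count_py_alt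
  simp [lemB]
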